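-- pv_equiv track=rewrite | github.com/jkbockstael/adventofcode-2015 | day01-part2.py | steps_to_enter_basement
-- ===== SOURCE A (Python) =====
-- def steps_to_enter_basement(directions):
--     steps = 0
--     floor = 0
--     for step in directions:
--         steps += 1
--         if step == '(':
--             floor += 1
--         if step == ')':
--             floor -= 1
--         if floor == -1:
--             return steps
--     return None
-- ===== SOURCE B (Python) =====
-- def steps_to_enter_basement(directions):
--     deltas = [1 if c == '(' else -1 if c == ')' else 0 for c in directions]
--     levels = []
--     total = 0
--     for d in deltas:
--         total += d
--         levels.append(total)
--     try:
--         return levels.index(-1) + 1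
--     except ValueError:
--         return None
-- ===== Notes on version B (the rewrite author's own statement) =====
-- stated objective: alternative
-- what changed: Replaces the fused counter/floor accumulator loop by a table build (delta map, then prefix-sum levels list) followed by a separate first-index search for level -1.
import Mathlib
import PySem

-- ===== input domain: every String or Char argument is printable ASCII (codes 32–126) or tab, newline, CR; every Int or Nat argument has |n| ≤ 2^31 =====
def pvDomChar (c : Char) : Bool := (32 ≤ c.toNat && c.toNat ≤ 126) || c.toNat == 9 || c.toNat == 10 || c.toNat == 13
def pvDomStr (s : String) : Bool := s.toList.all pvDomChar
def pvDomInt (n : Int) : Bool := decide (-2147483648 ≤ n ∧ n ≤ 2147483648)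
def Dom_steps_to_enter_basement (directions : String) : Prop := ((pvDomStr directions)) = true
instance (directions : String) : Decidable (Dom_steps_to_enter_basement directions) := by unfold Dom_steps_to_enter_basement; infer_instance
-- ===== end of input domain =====

-- B builds a delta table and prefix-sum level list, then searches it for -1 (alternative decomposition; same cost).


-- ===== PORT A =====
def pvLoopA : List Char → Int → Int → Option Int
  | [], _, _ => none
  | c :: cs, steps, floor =>
    let steps := steps + 1
    let floor := floor + (if c = '(' then 1 else 0)
    let floor := floor + (if c = ')' then -1 else 0)
    if floor = -1 then some steps else pvLoopA cs steps floor

def steps_to_enter_basement (directions : String) : Option Int :=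
  pvLoopA directions.toList 0 0

-- ===== PORT B =====
def pvDelta (c : Char) : Int := if c = '(' then 1 else if c = ')' then -1 else 0

-- the 'total += d; levels.append(total)' loop of Source B
def pvLevels : Int → List Int → List Int
  | _, [] => []
  | t, d :: ds => (t + d) :: pvLevels (t + d) ds

def steps_to_enter_basement_alt (directions : String) : Option Int :=
  let deltas := directions.toList.map pvDelta
  let levels := pvLevels 0 deltas
  match PySem.List.index? levels (-1) with
  | none => none            -- except ValueError: return None
  | some k => some ((k : Int) + 1)

-- ===== PRECONDITION & SPEC =====
def Spec_steps_to_enter_basement (directions : String) (out : Option Int) : Prop := out = steps_to_enter_basement_alt directions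
instance (directions : String) (out : Option Int) : Decidable (Spec_steps_to_enter_basement directions out) := by unfold Spec_steps_to_enter_basement; infer_instance

-- ===== CLAIM (what is proved, stated in full; the proofs are below) =====
def Claim_equal_steps_to_enter_basement : Prop := ∀ (directions : String), Dom_steps_to_enter_basement directions → Spec_steps_to_enter_basement directions (steps_to_enter_basement directions)

-- ===== LEMMAS AND PROOFS =====
theorem pvLoopA_eq_index (cs : List Char) : ∀ (steps floor : Int),
    pvLoopA cs steps floor =
      (match PySem.List.index? (pvLevels floor (cs.map pvDelta)) (-1) with
       | none => none
       | some k => some (steps + (k : Int) + 1)) := by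
  induction cs with
  | nil => intro steps floor; rfl
  | cons c cs ih =>
    intro steps floor
    have hδ : floor + (if c = '(' then 1 else 0) + (if c = ')' then -1 else 0) = floor + pvDelta c := by
      simp only [pvDelta]
      split_ifs with h1 h2 <;> first | omega | exact absurd (h1 ▸ h2) (by decide)
    simp only [pvLoopA, List.map_cons, pvLevels, hδ]
    by_cases h : floor + pvDelta c = -1
    · rw [if_pos h, h, PySem.List.index?_cons_self]
      simp
    · rw [if_neg h, PySem.List.index?_cons_of_ne _ h, ih]
      cases PySem.List.index? (pvLevels (floor + pvDelta c) (cs.map pvDelta)) (-1) with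
      | none => rfl
      | some k =>
        simp only [Option.map_some]
        push_cast
        ring_nf

-- ===== VERDICT (by name: the statement is the Claim_ definition above) =====
theorem steps_to_enter_basement_spec : Claim_equal_steps_to_enter_basement := by
  intro directions _
  unfold Spec_steps_to_enter_basement steps_to_enter_basement steps_to_enter_basement_alt
  rw [pvLoopA_eq_index]
  cases hx : PySem.List.index? (pvLevels 0 (directions.toList.map pvDelta)) (-1) with
  | none => rw [PySem.List.index?_eq_idxOf?] at hx; simp [hx, PySem.List.index?_eq_idxOf?]
  | some k => rw [PySem.List.index?_eq_idxOf?] at hx; simp [hx, PySem.List.index?_eq_idxOf?]
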